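-- pv_equiv track=rewrite | github.com/b1r3k/adventofcode | 2021/005_hydrothermal_venture/solution2.py | get_diagonal_points
-- ===== SOURCE A (Python) =====
-- def get_diagonal_points(x1, y1, x2, y2):
--     x_direction = 1 if x2 > x1 else -1
--     y_direction = 1 if y2 > y1 else -1
--     x = x1
--     y = y1
--     while True:
--         yield x, y
--         x += x_direction
--         y += y_direction
--         if x > max(x1, x2) or x < min(x1, x2):
--             break
--         if y > max(y1, y2) or y < min(y1, y2):
--             break
-- ===== SOURCE B (Python) =====
-- def get_diagonal_points(x1, y1, x2, y2):
--     n = min(abs(x2 - x1), abs(y2 - y1)) + 1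
--     x_direction = 1 if x2 > x1 else -1
--     y_direction = 1 if y2 > y1 else -1
--     for i in range(n):
--         yield (x1 + i * x_direction, y1 + i * y_direction)
-- ===== Notes on version B (the rewrite author's own statement) =====
-- stated objective: simpler
-- what changed: Replaces the while-True loop with mutable state, per-step max/min range tests and two break checks by a single counted for-loop: the number of points min(|x2-x1|,|y2-y1|)+1 is computed up front and each point is derived from the index by a closed formula.
import Mathlib
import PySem

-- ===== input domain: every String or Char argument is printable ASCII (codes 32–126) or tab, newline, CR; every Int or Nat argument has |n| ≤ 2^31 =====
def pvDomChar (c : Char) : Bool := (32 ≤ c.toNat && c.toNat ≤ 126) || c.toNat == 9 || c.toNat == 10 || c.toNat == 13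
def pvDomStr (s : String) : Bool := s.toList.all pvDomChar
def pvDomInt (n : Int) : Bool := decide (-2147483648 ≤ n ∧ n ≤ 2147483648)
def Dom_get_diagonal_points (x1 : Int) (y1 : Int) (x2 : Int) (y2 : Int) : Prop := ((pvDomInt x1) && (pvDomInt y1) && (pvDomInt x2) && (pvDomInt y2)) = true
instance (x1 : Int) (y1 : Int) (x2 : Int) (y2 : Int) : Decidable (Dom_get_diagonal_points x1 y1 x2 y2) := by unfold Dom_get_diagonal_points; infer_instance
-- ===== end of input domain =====

-- B replaces A's while-True/step/break loop by a counted for-loop over a precomputed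
-- point count with a closed-form point for each index (objective: simpler).


-- ===== PORT A =====
-- the while-True body: yield (x, y); step; break if x or y left its range; fuel only
-- makes the recursion total (it is always sufficient, see the proofs below)
def pvLoopA (x1 y1 x2 y2 xd yd : Int) : Nat → Int → Int → List (Int × Int)
  | 0, _, _ => []
  | f + 1, x, y =>
    (x, y) ::
      (let x' := x + xd
       let y' := y + yd
       if x' > max x1 x2 ∨ x' < min x1 x2 then []
       else if y' > max y1 y2 ∨ y' < min y1 y2 then []
       else pvLoopA x1 y1 x2 y2 xd yd f x' y')

def get_diagonal_points (x1 : Int) (y1 : Int) (x2 : Int) (y2 : Int) : List (Int × Int) :=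
  let x_direction : Int := if x2 > x1 then 1 else -1
  let y_direction : Int := if y2 > y1 then 1 else -1
  pvLoopA x1 y1 x2 y2 x_direction y_direction
    (min (x2 - x1).natAbs (y2 - y1).natAbs + 2) x1 y1

-- ===== PORT B =====
def get_diagonal_points_alt (x1 : Int) (y1 : Int) (x2 : Int) (y2 : Int) : List (Int × Int) :=
  let n := min (x2 - x1).natAbs (y2 - y1).natAbs + 1
  let x_direction : Int := if x2 > x1 then 1 else -1
  let y_direction : Int := if y2 > y1 then 1 else -1
  (List.range n).map (fun (i : Nat) => (x1 + (i : Int) * x_direction, y1 + (i : Int) * y_direction))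

-- ===== PRECONDITION & SPEC =====
def Spec_get_diagonal_points (x1 : Int) (y1 : Int) (x2 : Int) (y2 : Int) (out : List (Int × Int)) : Prop := out = get_diagonal_points_alt x1 y1 x2 y2
instance (x1 : Int) (y1 : Int) (x2 : Int) (y2 : Int) (out : List (Int × Int)) : Decidable (Spec_get_diagonal_points x1 y1 x2 y2 out) := by unfold Spec_get_diagonal_points; infer_instance

-- ===== CLAIM (what is proved, stated in full; the proofs are below) =====
def Claim_equal_get_diagonal_points : Prop := ∀ (x1 : Int) (y1 : Int) (x2 : Int) (y2 : Int), Dom_get_diagonal_points x1 y1 x2 y2 → Spec_get_diagonal_points x1 y1 x2 y2 (get_diagonal_points x1 y1 x2 y2)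

-- ===== LEMMAS AND PROOFS =====

-- a stepped coordinate stays in its range iff the step count has not passed the span
lemma pv_step_in_range (a b : Int) (j : Nat) :
    (a + (j : Int) * (if b > a then 1 else -1) > max a b ∨
     a + (j : Int) * (if b > a then 1 else -1) < min a b) ↔ (b - a).natAbs < j := by
  split_ifs with h <;> constructor <;> intro hj <;> omega

lemma pvLoopA_eq (x1 y1 x2 y2 : Int) (f k : Nat)
    (hk : k ≤ min (x2 - x1).natAbs (y2 - y1).natAbs)
    (hf : min (x2 - x1).natAbs (y2 - y1).natAbs - k < f) :
    pvLoopA x1 y1 x2 y2 (if x2 > x1 then 1 else -1) (if y2 > y1 then 1 else -1) f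
        (x1 + (k : Int) * (if x2 > x1 then 1 else -1))
        (y1 + (k : Int) * (if y2 > y1 then 1 else -1))
      = (List.range (min (x2 - x1).natAbs (y2 - y1).natAbs - k + 1)).map
          (fun i => (x1 + ((k + i : Nat) : Int) * (if x2 > x1 then 1 else -1),
                     y1 + ((k + i : Nat) : Int) * (if y2 > y1 then 1 else -1))) := by
  set m := min (x2 - x1).natAbs (y2 - y1).natAbs with hm
  induction f generalizing k with
  | zero => omega
  | succ f ih =>
    rw [pvLoopA]
    by_cases hkm : k = m
    · -- last point: the step leaves one of the two ranges
      have hbreak : (x1 + ((k + 1 : Nat) : Int) * (if x2 > x1 then 1 else -1) > max x1 x2 ∨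
          x1 + ((k + 1 : Nat) : Int) * (if x2 > x1 then 1 else -1) < min x1 x2) ∨
          (y1 + ((k + 1 : Nat) : Int) * (if y2 > y1 then 1 else -1) > max y1 y2 ∨
          y1 + ((k + 1 : Nat) : Int) * (if y2 > y1 then 1 else -1) < min y1 y2) := by
        rw [pv_step_in_range, pv_step_in_range]; omega
      have hx1 : x1 + (k : Int) * (if x2 > x1 then 1 else -1) + (if x2 > x1 then 1 else -1)
          = x1 + ((k + 1 : Nat) : Int) * (if x2 > x1 then 1 else -1) := by push_cast; ring
      have hy1 : y1 + (k : Int) * (if y2 > y1 then 1 else -1) + (if y2 > y1 then 1 else -1)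
          = y1 + ((k + 1 : Nat) : Int) * (if y2 > y1 then 1 else -1) := by push_cast; ring
      simp only [hx1, hy1]
      have hmk : m - k + 1 = 1 := by omega
      rw [hmk]
      rcases hbreak with hb | hb
      · rw [if_pos hb]; simp
      · by_cases hbx : (x1 + ((k + 1 : Nat) : Int) * (if x2 > x1 then 1 else -1) > max x1 x2 ∨
            x1 + ((k + 1 : Nat) : Int) * (if x2 > x1 then 1 else -1) < min x1 x2)
        · rw [if_pos hbx]; simp
        · rw [if_neg hbx, if_pos hb]; simp
    · -- k < m: neither break fires, recurse
      have hklt : k < m := lt_of_le_of_ne hk hkm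
      have hx1 : x1 + (k : Int) * (if x2 > x1 then 1 else -1) + (if x2 > x1 then 1 else -1)
          = x1 + ((k + 1 : Nat) : Int) * (if x2 > x1 then 1 else -1) := by push_cast; ring
      have hy1 : y1 + (k : Int) * (if y2 > y1 then 1 else -1) + (if y2 > y1 then 1 else -1)
          = y1 + ((k + 1 : Nat) : Int) * (if y2 > y1 then 1 else -1) := by push_cast; ring
      simp only [hx1, hy1]
      have hnx : ¬(x1 + ((k + 1 : Nat) : Int) * (if x2 > x1 then 1 else -1) > max x1 x2 ∨
          x1 + ((k + 1 : Nat) : Int) * (if x2 > x1 then 1 else -1) < min x1 x2) := by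
        rw [pv_step_in_range]; omega
      have hny : ¬(y1 + ((k + 1 : Nat) : Int) * (if y2 > y1 then 1 else -1) > max y1 y2 ∨
          y1 + ((k + 1 : Nat) : Int) * (if y2 > y1 then 1 else -1) < min y1 y2) := by
        rw [pv_step_in_range]; omega
      rw [if_neg hnx, if_neg hny, ih (k + 1) (by omega) (by omega)]
      have hr : m - k + 1 = (m - (k + 1) + 1) + 1 := by omega
      conv_rhs => rw [hr, List.range_succ_eq_map, List.map_cons, List.map_map]
      congr 1
      apply List.map_congr_left
      intro i _
      simp only [Function.comp_apply, Nat.succ_eq_add_one]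
      rw [show k + (i + 1) = k + 1 + i from by omega]

-- ===== VERDICT (by name: the statement is the Claim_ definition above) =====
theorem get_diagonal_points_spec : Claim_equal_get_diagonal_points := by
  intro x1 y1 x2 y2 _
  show get_diagonal_points x1 y1 x2 y2 = get_diagonal_points_alt x1 y1 x2 y2
  have h := pvLoopA_eq x1 y1 x2 y2 (min (x2 - x1).natAbs (y2 - y1).natAbs + 2) 0
    (by omega) (by omega)
  simp only [Nat.cast_zero, zero_mul, add_zero, Nat.sub_zero, Nat.zero_add] at h
  simpa [get_diagonal_points, get_diagonal_points_alt] using h
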